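-- pv_equiv track=rewrite | github.com/wildangbudhi/Alpha-Beta-Pruning---Tic-Tac-Toe | BitMask.py | UnHash
-- ===== SOURCE A (Python) =====
-- def UnHash(num, size):
--     res = []
--
--     for i in range(0, size):
--         res.append([])
--         for j in range(0, size):
--             temp = 3
--             cal = num & temp
--             if(cal == 1): res[i].append('x')
--             elif(cal == 2): res[i].append('o')
--             else: res[i].append(' ')
--             num = num >> 2
--
--     return res
-- ===== SOURCE B (Python) =====
-- SYMBOLS = (' ', 'x', 'o', ' ')
--
-- def _decode_row(val, size):
--     cells = []
--     for _ in range(size):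
--         val, d = divmod(val, 4)
--         cells.append(SYMBOLS[d])
--     return cells
--
-- def UnHash(num, size):
--     # arithmetic splitting: cut num into per-row integers by divmod with 4**size,
--     # then decode each row value independently
--     base = 4 ** size if size > 0 else 1
--     row_vals = []
--     for _ in range(size):
--         num, r = divmod(num, base)
--         row_vals.append(r)
--     return [_decode_row(r, size) for r in row_vals]
-- ===== Notes on version B (the rewrite author's own statement) =====
-- stated objective: alternative
-- what changed: Replaces A's single nested loop with bitwise mask-and-shift by arithmetic splitting: one pass cuts num into per-row integers via divmod by 4**size, then each row value is decoded independently via divmod by 4 through a symbol table.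
import Mathlib
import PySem

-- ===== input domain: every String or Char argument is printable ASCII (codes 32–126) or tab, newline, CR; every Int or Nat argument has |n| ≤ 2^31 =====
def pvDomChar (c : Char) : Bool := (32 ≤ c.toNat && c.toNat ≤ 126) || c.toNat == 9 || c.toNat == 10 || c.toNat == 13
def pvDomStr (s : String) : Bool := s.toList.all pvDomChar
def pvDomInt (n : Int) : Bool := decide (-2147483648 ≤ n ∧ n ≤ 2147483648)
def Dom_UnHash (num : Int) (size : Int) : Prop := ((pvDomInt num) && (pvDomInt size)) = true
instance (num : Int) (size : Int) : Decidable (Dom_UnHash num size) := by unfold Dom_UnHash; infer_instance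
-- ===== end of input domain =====

-- B decodes the bitmask by arithmetic splitting: it first cuts num into per-row integers via
-- divmod by 4**size, then decodes each row value independently with divmod by 4; A's single
-- nested loop with bitwise mask-and-shift disappears; objective: alternative.


-- ===== PORT A =====
-- literal port of A: outer loop appends a fresh row; inner loop decodes num & 3 into a cell,
-- appends it to the current row and shifts num right by 2; state is (rows so far, current num).
def UnHash (num : Int) (size : Int) : List (List String) :=
  ((PySem.List.pyRange 0 size 1).foldl
      (fun (st : List (List String) × Int) (_i : Int) =>
        let inner := (PySem.List.pyRange 0 size 1).foldl
          (fun (rn : List String × Int) (_j : Int) =>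
            let temp : Int := 3
            let cal := PySem.Int.band rn.2 temp
            let cell := if cal == 1 then "x" else if cal == 2 then "o" else " "
            (rn.1 ++ [cell], rn.2 >>> (2:Nat)))
          ([], st.2)
        (st.1 ++ [inner.1], inner.2))
      ([], num)).1

-- ===== PORT B =====
-- SYMBOLS[d]: d = val % 4 is always in [0,4), so the tuple index never raises; ported as
-- pyGet? (none = IndexError) defaulted.  divmod(val, 4) with the constant positive divisor 4
-- never raises and is ported as floordiv/mod.
def UnHash_decode_row (val : Int) (size : Int) : List String :=
  ((PySem.List.pyRange 0 size 1).foldl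
      (fun (st : Int × List String) (_k : Int) =>
        let q := PySem.Int.floordiv st.1 4
        let d := PySem.Int.mod st.1 4
        (q, st.2 ++ [(PySem.List.pyGet? [" ", "x", "o", " "] d).getD " "]))
      (val, [])).2

-- divmod(num, base) with base = 4**size > 0 (or 1) never raises; ported as floordiv/mod.
def UnHash_alt (num : Int) (size : Int) : List (List String) :=
  let base : Int := if size > 0 then 4 ^ size.toNat else 1
  let rowVals := ((PySem.List.pyRange 0 size 1).foldl
      (fun (st : Int × List Int) (_k : Int) =>
        let q := PySem.Int.floordiv st.1 base
        let r := PySem.Int.mod st.1 base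
        (q, st.2 ++ [r]))
      (num, [])).2
  rowVals.map (fun r => UnHash_decode_row r size)

-- ===== PRECONDITION & SPEC =====
def Spec_UnHash (num : Int) (size : Int) (out : List (List String)) : Prop := out = UnHash_alt num size
instance (num : Int) (size : Int) (out : List (List String)) : Decidable (Spec_UnHash num size out) := by unfold Spec_UnHash; infer_instance

-- ===== CLAIM (what is proved, stated in full; the proofs are below) =====
def Claim_equal_UnHash : Prop := ∀ (num : Int) (size : Int), Dom_UnHash num size → Spec_UnHash num size (UnHash num size)

-- ===== LEMMAS AND PROOFS =====

-- the decoded cell read off the current value n (A reads n & 3 before shifting)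
def pvCell (n : Int) : String :=
  if PySem.Int.band n 3 == 1 then "x" else if PySem.Int.band n 3 == 2 then "o" else " "

-- reference row of width s starting at current value n
def pvRow (n : Int) : Nat → List String
  | 0 => []
  | m + 1 => pvCell n :: pvRow (n >>> (2:Nat)) m

-- reference grid of m rows of width s starting at current value n
def pvGrid (n : Int) (s : Nat) : Nat → List (List String)
  | 0 => []
  | m + 1 => pvRow n s :: pvGrid (n >>> (2 * s)) s m

-- reference list of m row values peeled off n by divmod with base B
def pvVals (n : Int) (B : Int) : Nat → List Int
  | 0 => []
  | m + 1 => PySem.Int.mod n B :: pvVals (PySem.Int.floordiv n B) B m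

theorem innerA_spec (l : List Int) : ∀ (acc : List String) (n : Int),
    l.foldl (fun (rn : List String × Int) (_j : Int) =>
        (rn.1 ++ [if PySem.Int.band rn.2 3 == 1 then "x"
                  else if PySem.Int.band rn.2 3 == 2 then "o" else " "], rn.2 >>> (2:Nat))) (acc, n)
      = (acc ++ pvRow n l.length, n >>> (2 * l.length)) := by
  induction l with
  | nil => intro acc n; simp [pvRow]
  | cons x xs ih =>
    intro acc n
    simp only [List.foldl_cons, ih, List.length_cons, pvRow]
    refine Prod.ext ?_ ?_
    · simp [pvCell]
    · show n >>> (2:Nat) >>> (2 * xs.length) = n >>> (2 * (xs.length + 1))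
      rw [← Int.shiftRight_add]
      congr 1; omega

theorem outerA_spec (size : Int) (l : List Int) : ∀ (acc : List (List String)) (n : Int),
    l.foldl
      (fun (st : List (List String) × Int) (_i : Int) =>
        let inner := (PySem.List.pyRange 0 size 1).foldl
          (fun (rn : List String × Int) (_j : Int) =>
            (rn.1 ++ [if PySem.Int.band rn.2 3 == 1 then "x"
                      else if PySem.Int.band rn.2 3 == 2 then "o" else " "], rn.2 >>> (2:Nat)))
          ([], st.2)
        (st.1 ++ [inner.1], inner.2))
      (acc, n)
      = (acc ++ pvGrid n size.toNat l.length, n >>> (2 * size.toNat * l.length)) := by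
  have hlen : (PySem.List.pyRange 0 size 1).length = size.toNat := by
    rw [PySem.List.length_pyRange_one]; omega
  induction l with
  | nil => intro acc n; simp [pvGrid]
  | cons x xs ih =>
    intro acc n
    rw [List.foldl_cons]
    have hstep : (let inner := (PySem.List.pyRange 0 size 1).foldl (fun (rn : List String × Int) (_j : Int) => (rn.1 ++ [if PySem.Int.band rn.2 3 == 1 then "x" else if PySem.Int.band rn.2 3 == 2 then "o" else " "], rn.2 >>> (2:Nat))) ([], (acc, n).2); ((acc, n).1 ++ [inner.1], inner.2)) = (acc ++ [pvRow n size.toNat], n >>> (2 * size.toNat)) := by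
      simp only [innerA_spec, hlen, List.nil_append]
    rw [hstep, ih]
    refine Prod.ext ?_ ?_
    · simp [pvGrid]
    · show n >>> (2 * size.toNat) >>> (2 * size.toNat * xs.length)
        = n >>> (2 * size.toNat * (xs.length + 1))
      rw [← Int.shiftRight_add]
      congr 1; ring

theorem UnHash_eq_grid (num size : Int) :
    UnHash num size = pvGrid num (size.toNat) (size.toNat) := by
  show ((PySem.List.pyRange 0 size 1).foldl
      (fun (st : List (List String) × Int) (_i : Int) =>
        let inner := (PySem.List.pyRange 0 size 1).foldl
          (fun (rn : List String × Int) (_j : Int) =>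
            (rn.1 ++ [if PySem.Int.band rn.2 3 == 1 then "x"
                      else if PySem.Int.band rn.2 3 == 2 then "o" else " "], rn.2 >>> (2:Nat)))
          ([], st.2)
        (st.1 ++ [inner.1], inner.2))
      ([], num)).1 = pvGrid num (size.toNat) (size.toNat)
  rw [outerA_spec]
  simp [PySem.List.length_pyRange_one]

-- Python n & 3 is n mod 4 (two's complement on negatives)
theorem band_three_eq_mod (n : Int) : PySem.Int.band n 3 = PySem.Int.mod n 4 := by
  have hmod : PySem.Int.mod n 4 = n % 4 := PySem.Int.mod_eq_emod_of_pos (by norm_num)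
  rw [hmod]
  unfold PySem.Int.band
  split_ifs with h1 h2 h2
  · have h3 : (3:Int).toNat = 3 := rfl
    rw [h3, Nat.and_two_pow_sub_one_eq_mod n.toNat 2]
    omega
  · omega
  · have h3 : (3:Int).toNat = 3 := rfl
    rw [h3, Nat.and_comm, Nat.and_two_pow_sub_one_eq_mod ((-n-1).toNat) 2]
    omega
  · omega

-- Python n >> 2 is floor division by 4
theorem shift_two_eq_floordiv (n : Int) : n >>> (2:Nat) = PySem.Int.floordiv n 4 := by
  rw [PySem.Int.floordiv_eq_ediv_of_pos (by norm_num), Int.shiftRight_eq_div_pow]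
  norm_num

-- the symbol-table cell equals A's if-chain cell
theorem cell_eq (n : Int) :
    (PySem.List.pyGet? [" ", "x", "o", " "] (PySem.Int.mod n 4)).getD " " = pvCell n := by
  unfold pvCell
  simp only [band_three_eq_mod]
  have hmod : PySem.Int.mod n 4 = n % 4 := PySem.Int.mod_eq_emod_of_pos (by norm_num)
  rw [hmod]
  have h0 : 0 ≤ n % 4 := Int.emod_nonneg n (by norm_num)
  have h4 : n % 4 < 4 := Int.emod_lt_of_pos n (by norm_num)
  interval_cases h : (n % 4) <;> decide

theorem decode_fold (l : List Int) : ∀ (acc : List String) (n : Int),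
    l.foldl (fun (st : Int × List String) (_k : Int) =>
        (PySem.Int.floordiv st.1 4,
         st.2 ++ [(PySem.List.pyGet? [" ", "x", "o", " "] (PySem.Int.mod st.1 4)).getD " "]))
      (n, acc)
      = (n >>> (2 * l.length), acc ++ pvRow n l.length) := by
  induction l with
  | nil => intro acc n; simp [pvRow]
  | cons x xs ih =>
    intro acc n
    simp only [List.foldl_cons]
    rw [ih]
    refine Prod.ext ?_ ?_
    · show PySem.Int.floordiv n 4 >>> (2 * xs.length) = n >>> (2 * (xs.length + 1))
      rw [← shift_two_eq_floordiv, ← Int.shiftRight_add]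
      congr 1; omega
    · show (acc ++ [(PySem.List.pyGet? [" ", "x", "o", " "] (PySem.Int.mod n 4)).getD " "])
          ++ pvRow (PySem.Int.floordiv n 4) xs.length = acc ++ pvRow n (xs.length + 1)
      rw [← shift_two_eq_floordiv, cell_eq]
      simp [pvRow]

theorem decode_eq_pvRow (n size : Int) :
    UnHash_decode_row n size = pvRow n size.toNat := by
  have hl : (PySem.List.pyRange 0 size 1).length = size.toNat := by
    rw [PySem.List.length_pyRange_one]; omega
  unfold UnHash_decode_row
  rw [decode_fold, hl]
  simp

theorem vals_fold (B : Int) (l : List Int) : ∀ (acc : List Int) (n : Int),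
    (l.foldl (fun (st : Int × List Int) (_k : Int) =>
        (PySem.Int.floordiv st.1 B, st.2 ++ [PySem.Int.mod st.1 B]))
      (n, acc)).2 = acc ++ pvVals n B l.length := by
  induction l with
  | nil => intro acc n; simp [pvVals]
  | cons x xs ih =>
    intro acc n
    simp only [List.foldl_cons, ih, List.length_cons, pvVals]
    simp

-- pvRow of width s only depends on the value mod 4^s
theorem pvRow_mod (s : Nat) : ∀ (n : Int), pvRow (n % (4:Int) ^ s) s = pvRow n s := by
  induction s with
  | zero => intro n; simp [pvRow]
  | succ s ih =>
    intro n
    have hB : (0:Int) < 4 ^ s := by positivity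
    have hcell : pvCell (n % (4:Int) ^ (s + 1)) = pvCell n := by
      unfold pvCell
      simp only [band_three_eq_mod]
      have hmod : ∀ m : Int, PySem.Int.mod m 4 = m % 4 :=
        fun m => PySem.Int.mod_eq_emod_of_pos (by norm_num)
      rw [hmod, hmod, Int.emod_emod_of_dvd n (dvd_pow_self 4 (Nat.succ_ne_zero s))]
    have hshift : (n % (4:Int) ^ (s + 1)) >>> (2:Nat) = (n >>> (2:Nat)) % (4:Int) ^ s := by
      rw [shift_two_eq_floordiv, shift_two_eq_floordiv,
        PySem.Int.floordiv_eq_ediv_of_pos (by norm_num : (0:Int) < 4),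
        PySem.Int.floordiv_eq_ediv_of_pos (by norm_num : (0:Int) < 4)]
      have h0r : 0 ≤ n % (4:Int) ^ (s + 1) := Int.emod_nonneg n (by positivity)
      have h1r : n % (4:Int) ^ (s + 1) < 4 ^ (s + 1) := Int.emod_lt_of_pos n (by positivity)
      have hn : n = n % (4:Int) ^ (s + 1) + ((4:Int) ^ s * (n / 4 ^ (s + 1))) * 4 := by
        have h := Int.emod_add_mul_ediv n ((4:Int) ^ (s + 1))
        rw [pow_succ] at h ⊢
        linarith [h]
      have hq0 : 0 ≤ n % (4:Int) ^ (s + 1) / 4 := Int.ediv_nonneg h0r (by norm_num)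
      have hqlt : n % (4:Int) ^ (s + 1) / 4 < 4 ^ s := by
        have h1r' : n % (4:Int) ^ (s + 1) < 4 ^ s * 4 := by rw [← pow_succ]; exact h1r
        omega
      have h2 : n / 4 = n % (4:Int) ^ (s + 1) / 4 + 4 ^ s * (n / 4 ^ (s + 1)) := by
        conv_lhs => rw [hn]
        rw [Int.add_mul_ediv_right _ _ (by norm_num : (4:Int) ≠ 0)]
      rw [h2, Int.add_mul_emod_self_left, Int.emod_eq_of_lt hq0 hqlt]
    show pvCell (n % (4:Int) ^ (s+1)) :: pvRow ((n % (4:Int) ^ (s+1)) >>> (2:Nat)) s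
        = pvCell n :: pvRow (n >>> (2:Nat)) s
    rw [hcell, hshift, ih]

theorem map_pvVals_eq_pvGrid (s : Nat) (m : Nat) : ∀ (n : Int),
    (pvVals n ((4:Int) ^ s) m).map (fun r => pvRow r s) = pvGrid n s m := by
  induction m with
  | zero => intro n; simp [pvVals, pvGrid]
  | succ m ih =>
    intro n
    have hB : (0:Int) < 4 ^ s := by positivity
    have hmod : PySem.Int.mod n ((4:Int) ^ s) = n % 4 ^ s :=
      PySem.Int.mod_eq_emod_of_pos hB
    have hdiv : PySem.Int.floordiv n ((4:Int) ^ s) = n >>> (2 * s) := by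
      rw [PySem.Int.floordiv_eq_ediv_of_pos hB, Int.shiftRight_eq_div_pow]
      congr 1
      rw [pow_mul]
      norm_num
    show pvRow (PySem.Int.mod n ((4:Int) ^ s)) s
          :: (pvVals (PySem.Int.floordiv n ((4:Int) ^ s)) ((4:Int) ^ s) m).map (fun r => pvRow r s)
        = pvRow n s :: pvGrid (n >>> (2 * s)) s m
    rw [hmod, pvRow_mod, hdiv, ih]

theorem UnHash_alt_eq_grid (num size : Int) :
    UnHash_alt num size = pvGrid num (size.toNat) (size.toNat) := by
  unfold UnHash_alt
  rcases le_or_gt size 0 with hneg | hpos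
  · have h1 : PySem.List.pyRange 0 size 1 = [] := PySem.List.pyRange_one_eq_nil (by omega)
    have h2 : size.toNat = 0 := by omega
    simp [h1, h2, pvGrid]
  · have hif : (if size > 0 then (4:Int) ^ size.toNat else 1) = 4 ^ size.toNat := by
      simp [hpos]
    simp only [hif, vals_fold, PySem.List.length_pyRange_one, List.nil_append]
    have hlen : (size - 0).toNat = size.toNat := by omega
    rw [hlen]
    have : ∀ r : Int, UnHash_decode_row r size = pvRow r size.toNat := fun r => decode_eq_pvRow r size
    calc (pvVals num ((4:Int) ^ size.toNat) size.toNat).map (fun r => UnHash_decode_row r size)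
        = (pvVals num ((4:Int) ^ size.toNat) size.toNat).map (fun r => pvRow r size.toNat) := by
          exact List.map_congr_left (fun r _ => this r)
      _ = pvGrid num size.toNat size.toNat := map_pvVals_eq_pvGrid _ _ _

-- ===== VERDICT (by name: the statement is the Claim_ definition above) =====
theorem UnHash_spec : Claim_equal_UnHash := by
  intro num size _
  unfold Spec_UnHash
  rw [UnHash_eq_grid, UnHash_alt_eq_grid]
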